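-- pv_equiv track=rewrite | github.com/prajeshmadhavi/form20 | process.py | fix_candidate_name
-- ===== SOURCE A (Python) =====
-- def fix_candidate_name(scrambled_name):
--     """Fix scrambled candidate name from PDF extraction"""
--     if not scrambled_name or not scrambled_name.strip():
--         return ''
--
--     # Handle the specific scrambling pattern in AC_15 type PDFs
--     words = scrambled_name.split('\n')
--     corrected_words = []
--
--     for word in words:
--         if word.strip():
--             # Reverse characters in each word
--             reversed_word = word.strip()[::-1]
--             corrected_words.append(reversed_word)
--
--     # Reverse the order of words for proper name sequence
--     corrected_words.reverse()
--
--     return ' '.join(corrected_words)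
-- ===== SOURCE B (Python) =====
-- def fix_candidate_name(scrambled_name):
--     """Fix scrambled candidate name from PDF extraction"""
--     if not scrambled_name or not scrambled_name.strip():
--         return ''
--     pieces = scrambled_name[::-1].split('\n')
--     return ' '.join(p.strip() for p in pieces if p.strip())
-- ===== Notes on version B (the rewrite author's own statement) =====
-- stated objective: simpler
-- what changed: A reverses each stripped word separately and then reverses the word list; B reverses the whole string once, splits the reversal on newline, and joins the stripped non-empty pieces in one pass.
import Mathlib
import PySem

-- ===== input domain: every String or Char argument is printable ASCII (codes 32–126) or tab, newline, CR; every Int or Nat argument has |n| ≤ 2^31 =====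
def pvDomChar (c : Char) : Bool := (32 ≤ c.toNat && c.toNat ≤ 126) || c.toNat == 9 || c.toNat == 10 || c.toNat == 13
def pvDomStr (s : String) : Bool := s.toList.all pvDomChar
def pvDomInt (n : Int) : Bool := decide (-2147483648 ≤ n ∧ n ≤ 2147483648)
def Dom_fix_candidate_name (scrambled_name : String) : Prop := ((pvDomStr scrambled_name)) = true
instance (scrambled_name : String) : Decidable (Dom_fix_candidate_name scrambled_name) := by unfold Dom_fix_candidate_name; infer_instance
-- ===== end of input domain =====

-- B replaces A's per-word character reversal + list .reverse() with ONE global string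
-- reversal followed by a single split/strip/filter/join pass (objective: simpler).

-- ===== PORT A =====
-- A: guard on empty/all-whitespace; split on '\n'; per word with nonempty strip,
-- append reversed stripped word ([::-1] on a whole string = List.reverse); reverse
-- the collected list; join with ' '.
def fix_candidate_name (scrambled_name : String) : String :=
  if scrambled_name.toList = [] ∨ PySem.Chars.strip scrambled_name.toList = [] then "" else
    let words := PySem.Chars.splitOn scrambled_name.toList ['\n']
    let corrected_words := words.foldl
      (fun acc word =>
        if PySem.Chars.strip word ≠ [] then acc ++ [(PySem.Chars.strip word).reverse] else acc)
      ([] : List (List Char))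
    String.mk (PySem.Chars.join [' '] corrected_words.reverse)

-- ===== PORT B =====
-- B: same guard; reverse the WHOLE string once ([::-1] = List.reverse); split the
-- reversal on '\n'; the generator 'p.strip() for p in pieces if p.strip()' is the
-- filterMap below; join with ' '.
def fix_candidate_name_alt (scrambled_name : String) : String :=
  if scrambled_name.toList = [] ∨ PySem.Chars.strip scrambled_name.toList = [] then "" else
    let pieces := PySem.Chars.splitOn scrambled_name.toList.reverse ['\n']
    String.mk (PySem.Chars.join [' ']
      (pieces.filterMap (fun p =>
        if PySem.Chars.strip p ≠ [] then some (PySem.Chars.strip p) else none)))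

-- ===== PRECONDITION & SPEC =====
def Spec_fix_candidate_name (scrambled_name : String) (out : String) : Prop := out = fix_candidate_name_alt scrambled_name
instance (scrambled_name : String) (out : String) : Decidable (Spec_fix_candidate_name scrambled_name out) := by unfold Spec_fix_candidate_name; infer_instance

-- ===== CLAIM (what is proved, stated in full; the proofs are below) =====
def Claim_equal_fix_candidate_name : Prop := ∀ (scrambled_name : String), Dom_fix_candidate_name scrambled_name → Spec_fix_candidate_name scrambled_name (fix_candidate_name scrambled_name)

-- ===== LEMMAS AND PROOFS =====

-- PySem's fuel-based single-char splitter computes List.splitOn.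
theorem pv_splitOn_go_char (c : Char) :
    ∀ (fuel : Nat) (l cur : List Char) (accs : List (List Char)), l.length < fuel →
      PySem.Chars.splitOn.go [c] fuel l cur accs
        = accs.reverse ++ (l.splitOn c).modifyHead (cur.reverse ++ ·) := by
  intro fuel
  induction fuel with
  | zero => intro l cur accs h; omega
  | succ n ih =>
    intro l cur accs h
    cases l with
    | nil =>
      rw [PySem.Chars.splitOn.go]
      simp [List.splitOn, List.splitOnP_nil]
      omega
    | cons a rest =>
      rw [PySem.Chars.splitOn.go]
      by_cases hc : c = a
      · subst hc
        simp only [List.isPrefixOf, BEq.rfl, Bool.true_and, if_true,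
          List.length_cons, List.drop_succ_cons, List.length_nil, List.drop_zero]
        rw [ih rest [] (cur.reverse :: accs) (by simpa using Nat.lt_of_succ_lt_succ h)]
        simp only [List.splitOn, List.splitOnP_cons, BEq.rfl, if_true]
        cases List.splitOnP (fun x => x == c) rest <;> simp [List.modifyHead]
      · have hpre : [c].isPrefixOf (a :: rest) = false := by
          simp [List.isPrefixOf, hc]
        simp only [hpre, Bool.false_eq_true, if_false]
        rw [ih rest (a :: cur) accs (by simpa using Nat.lt_of_succ_lt_succ h)]
        have heq : (a :: rest).splitOn c
            = List.modifyHead (List.cons a) (rest.splitOn c) := by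
          simp [List.splitOn, List.splitOnP_cons, Ne.symm hc]
        rw [heq, List.modifyHead_modifyHead]
        cases rest.splitOn c <;> simp

theorem pv_splitOn_char (s : List Char) (c : Char) :
    PySem.Chars.splitOn s [c] = s.splitOn c := by
  unfold PySem.Chars.splitOn
  rw [pv_splitOn_go_char c (s.length + 1) s [] [] (by omega)]
  cases s.splitOn c <;> simp [List.modifyHead]

-- no piece of l.splitOn c contains c
theorem pv_not_mem_splitOn (l : List Char) (c : Char) (p : List Char) (h : p ∈ l.splitOn c) : c ∉ p := by
  induction l generalizing p with
  | nil => simp [List.splitOn, List.splitOnP_nil] at h; simp [h]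
  | cons a t ih =>
    simp only [List.splitOn, List.splitOnP_cons] at h ih ⊢
    by_cases hc : a = c
    · simp [hc] at h
      rcases h with h | h
      · simp [h]
      · exact ih p h
    · simp [hc] at h
      cases ht : List.splitOnP (fun b => b == c) t with
      | nil => exact absurd ht (List.splitOnP_ne_nil _ _)
      | cons q qs =>
        rw [ht] at h
        simp at h
        rcases h with h | h
        · subst h; intro hm
          rcases List.mem_cons.1 hm with h | h
          · exact hc h.symm
          · exact ih q (by rw [ht]; exact List.mem_cons_self ..) h
        · exact ih p (by rw [ht]; exact List.mem_cons_of_mem _ h)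

theorem pv_intercalate_append_one (c : Char) (ls : List (List Char)) (y : List Char) (h : ls ≠ []) :
    [c].intercalate (ls ++ [y]) = [c].intercalate ls ++ c :: y := by
  induction ls with
  | nil => simp at h
  | cons a t ih =>
    cases t with
    | nil => simp [List.intercalate, List.intersperse]
    | cons b u =>
      have := ih (by simp)
      simp only [List.cons_append] at *
      calc [c].intercalate (a :: (b :: (u ++ [y])))
          = a ++ [c] ++ [c].intercalate (b :: (u ++ [y])) := by
            cases u with
            | nil => simp [List.intercalate, List.intersperse]
            | cons _ _ => simp [List.intercalate, List.intersperse]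
        _ = a ++ [c] ++ ([c].intercalate (b :: u) ++ c :: y) := by rw [← this]
        _ = ([c].intercalate (a :: b :: u)) ++ c :: y := by
            simp [List.intercalate, List.intersperse]

theorem pv_rev_intercalate (c : Char) (ls : List (List Char)) :
    ([c].intercalate ls).reverse = [c].intercalate ((ls.map List.reverse).reverse) := by
  induction ls with
  | nil => simp [List.intercalate]
  | cons a t ih =>
    cases t with
    | nil => simp [List.intercalate, List.intersperse]
    | cons b u =>
      have h1 : [c].intercalate (a :: b :: u) = a ++ [c] ++ [c].intercalate (b :: u) := by
        simp [List.intercalate, List.intersperse]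
      have h2 : ((b :: u).map List.reverse).reverse ≠ [] := by simp
      have h3 : ((a :: b :: u).map List.reverse).reverse
          = ((b :: u).map List.reverse).reverse ++ [a.reverse] := by simp
      rw [h1, h3, pv_intercalate_append_one c _ _ h2, ← ih]
      simp

theorem pv_splitOn_reverse (l : List Char) (c : Char) :
    (l.reverse).splitOn c = ((l.splitOn c).map List.reverse).reverse := by
  have hne : l.splitOn c ≠ [] := List.splitOnP_ne_nil _ _
  have hmem : ∀ q ∈ (l.splitOn c).map List.reverse |>.reverse, c ∉ q := by
    intro q hq
    simp only [List.mem_reverse, List.mem_map] at hq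
    obtain ⟨p, hp, rfl⟩ := hq
    simpa using pv_not_mem_splitOn l c p hp
  have hne' : ((l.splitOn c).map List.reverse).reverse ≠ [] := by
    simpa using hne
  have hl : l.reverse = [c].intercalate (((l.splitOn c).map List.reverse).reverse) := by
    rw [← pv_rev_intercalate, List.intercalate_splitOn]
  rw [hl, List.splitOn_intercalate _ _ hmem hne']

theorem pv_lstrip_reverse (x : List Char) :
    PySem.Chars.lstrip x.reverse = (PySem.Chars.rstrip x).reverse := by
  simp [PySem.Chars.lstrip, PySem.Chars.rstrip]

theorem pv_rstrip_reverse (x : List Char) :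
    PySem.Chars.rstrip x.reverse = (PySem.Chars.lstrip x).reverse := by
  simp [PySem.Chars.lstrip, PySem.Chars.rstrip]

theorem pv_strip_comm (x : List Char) :
    PySem.Chars.lstrip (PySem.Chars.rstrip x) = PySem.Chars.rstrip (PySem.Chars.lstrip x) := by
  induction x with
  | nil => rfl
  | cons a t ih =>
    simp only [PySem.Chars.lstrip, PySem.Chars.rstrip] at *
    by_cases hp : PySem.Chars.isspace a
    · -- dropWhile from left skips a
      rw [List.dropWhile_cons_of_pos hp]
      -- left side: dropWhile p ((a::t).reverse) = dropWhile p (t.reverse ++ [a])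
      rw [show (a :: t).reverse = t.reverse ++ [a] by simp, List.dropWhile_append]
      by_cases he : (List.dropWhile PySem.Chars.isspace t.reverse).isEmpty
      · rw [if_pos he]
        rw [List.dropWhile_cons_of_pos hp, List.dropWhile_nil]
        have h0 : List.dropWhile PySem.Chars.isspace t.reverse = [] := by
          simpa [List.isEmpty_iff] using he
        rw [h0] at ih
        -- ih : dropWhile p [].reverse... wait ih LHS: dropWhile p ((dropWhile p t.reverse).reverse)
        simpa [h0] using ih
      · rw [if_neg he]
        simp only [List.reverse_append, List.reverse_cons, List.reverse_nil, List.nil_append]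
        rw [List.singleton_append, List.dropWhile_cons_of_pos hp]
        exact ih
    · rw [List.dropWhile_cons_of_neg hp]
      rw [show (a :: t).reverse = t.reverse ++ [a] by simp, List.dropWhile_append]
      have hne : ((List.dropWhile PySem.Chars.isspace t.reverse) ++ [a]).isEmpty = false := by simp
      by_cases he : (List.dropWhile PySem.Chars.isspace t.reverse).isEmpty
      · rw [if_pos he, List.dropWhile_cons_of_neg hp]
        have h0 : List.dropWhile PySem.Chars.isspace t.reverse = [] := by
          simpa [List.isEmpty_iff] using he
        simp [List.dropWhile_cons_of_neg hp]
      · rw [if_neg he]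
        simp only [List.reverse_append, List.reverse_cons, List.reverse_nil, List.nil_append]
        rw [List.singleton_append, List.dropWhile_cons_of_neg hp]

theorem pv_strip_reverse (x : List Char) :
    PySem.Chars.strip x.reverse = (PySem.Chars.strip x).reverse := by
  unfold PySem.Chars.strip
  rw [pv_lstrip_reverse, pv_rstrip_reverse, pv_strip_comm]

theorem pv_filterMap_eq {α β : Type} (q : α → Bool) (f : α → β) (l : List α) :
    l.filterMap (fun x => if q x = true then some (f x) else none)
      = (l.filter q).map f := by
  induction l with
  | nil => rfl
  | cons a t ih =>
    by_cases h : q a <;> simp [h, ih]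

-- ===== VERDICT (by name: the statement is the Claim_ definition above) =====
theorem fix_candidate_name_spec : Claim_equal_fix_candidate_name := by
  intro scrambled_name _
  unfold Spec_fix_candidate_name fix_candidate_name fix_candidate_name_alt
  split
  · rfl
  · dsimp only
    congr 1
    rw [pv_splitOn_char, pv_splitOn_char, pv_splitOn_reverse]
    set words := scrambled_name.toList.splitOn '\n' with hw
    congr 1
    -- A's foldl loop collects the mapped-and-filtered words
    rw [show (fun (acc : List (List Char)) word =>
          if PySem.Chars.strip word ≠ [] then acc ++ [(PySem.Chars.strip word).reverse] else acc)
        = (fun acc word =>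
          if (fun w => decide (PySem.Chars.strip w ≠ [])) word = true
          then acc ++ [(fun w => (PySem.Chars.strip w).reverse) word] else acc) by
      funext acc word; simp]
    rw [PySem.List.foldl_append_if]
    -- B's filterMap is a filter-then-map
    rw [show (fun p => if PySem.Chars.strip p ≠ [] then some (PySem.Chars.strip p) else none)
        = (fun p => if (fun q => decide (PySem.Chars.strip q ≠ [])) p = true
                    then some (PySem.Chars.strip p) else none) by
      funext p; simp]
    rw [pv_filterMap_eq _ PySem.Chars.strip]
    rw [List.filter_reverse, List.filter_map, List.map_reverse, List.map_map]
    simp only [List.nil_append]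
    congr 1
    rw [List.filter_congr (fun w _ => by
      simp [Function.comp, pv_strip_reverse] : ∀ w ∈ words,
        ((fun q => decide (PySem.Chars.strip q ≠ [])) ∘ List.reverse) w
          = (fun q => decide (PySem.Chars.strip q ≠ [])) w)]
    apply List.map_congr_left
    intro w _
    simp [Function.comp, pv_strip_reverse]
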